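-- pv_equiv track=rewrite | github.com/kmzn128/atcoder | b166/e.py | Main
-- ===== SOURCE A (Python) =====
-- def Main(N, A):
--     d = {}
--     d2 = {}
--     ans = 0
--     for i in range(N):
--         p = i+A[i]
--         if p not in d:
--             d[p] = []
--         d[p].append(i)
--     for i in range(N):
--         q = i-A[i]
--         if q not in d2:
--             d2[q] = []
--         d2[q].append(i)
--     for k, v in d.items():
--         if len(v) > 0 and k in d2:
--             ans += len(v) * len(d2[k])
--     return ans
-- ===== SOURCE B (Python) =====
-- def _bound(P, x, upper):
--     """On sorted P: first index i with P[i] > x (upper) resp. P[i] >= x (not upper)."""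
--     lo, hi = 0, len(P)
--     while lo < hi:
--         mid = (lo + hi) // 2
--         if (P[mid] <= x) if upper else (P[mid] < x):
--             lo = mid + 1
--         else:
--             hi = mid
--     return lo
--
--
-- def Main(N, A):
--     P = sorted(i + A[i] for i in range(N))
--     ans = 0
--     for j in range(N):
--         q = j - A[j]
--         ans += _bound(P, q, True) - _bound(P, q, False)
--     return ans
-- ===== Notes on version B (the rewrite author's own statement) =====
-- stated objective: alternative
-- what changed: B sorts the multiset of i+A[i] once and, for each j, counts matches of j-A[j] by a hand-written binary search (upper bound minus lower bound) on the sorted array, instead of A's two hash dicts of index lists and a product-over-keys pass.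
import Mathlib
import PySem

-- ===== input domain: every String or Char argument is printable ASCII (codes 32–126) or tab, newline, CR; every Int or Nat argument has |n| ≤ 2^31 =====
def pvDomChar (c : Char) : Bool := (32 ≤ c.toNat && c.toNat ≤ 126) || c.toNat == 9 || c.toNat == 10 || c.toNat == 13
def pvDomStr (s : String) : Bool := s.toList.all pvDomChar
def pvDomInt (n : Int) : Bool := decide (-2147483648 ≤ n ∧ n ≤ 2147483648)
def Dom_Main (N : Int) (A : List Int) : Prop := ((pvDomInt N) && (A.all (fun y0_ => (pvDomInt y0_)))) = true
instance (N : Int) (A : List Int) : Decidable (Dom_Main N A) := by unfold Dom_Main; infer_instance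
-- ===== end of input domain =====

-- B sorts the multiset of i+A[i] once and counts each j-A[j] by hand-written binary search
-- (upper bound minus lower bound), replacing A's two hash dicts of index lists and the
-- product-over-keys pass (alternative algorithm, same result).

-- ===== PORT A =====
def Main (N : Int) (A : List Int) : Int :=
  let d := (PySem.List.pyRange 0 N 1).foldl (fun d i =>
      let p := i + PySem.List.pyGetD A i 0
      (if d.contains p then d else d.insert p ([] : List Int)).modify p [] (fun v => v ++ [i]))
    PySem.Dict.empty
  let d2 := (PySem.List.pyRange 0 N 1).foldl (fun d i =>
      let q := i - PySem.List.pyGetD A i 0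
      (if d.contains q then d else d.insert q ([] : List Int)).modify q [] (fun v => v ++ [i]))
    PySem.Dict.empty
  d.items.foldl (fun ans kv =>
      if 0 < PySem.List.len kv.2 ∧ d2.contains kv.1 = true then
        ans + PySem.List.len kv.2 * PySem.List.len (d2.getD kv.1 []) else ans) 0

-- ===== PORT B =====
-- hand-written binary search from Source B (`_bound`'s while-loop, ported step for step)
def boundAux (P : List Int) (x : Int) (upper : Bool) (lo hi : Int) : Int :=
  if h : lo < hi then
    let mid := PySem.Int.floordiv (lo + hi) 2
    if (if upper then PySem.List.pyGetD P mid 0 ≤ x else PySem.List.pyGetD P mid 0 < x) then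
      boundAux P x upper (mid + 1) hi
    else
      boundAux P x upper lo mid
  else lo
termination_by (hi - lo).toNat
decreasing_by
  · have := PySem.Int.floordiv_two_mid_bounds (le_of_lt h)
    omega
  · have h2 : PySem.Int.floordiv (lo + hi) 2 < hi :=
      (PySem.Int.floordiv_lt_iff_lt_mul (by norm_num)).mpr (by omega)
    have := PySem.Int.floordiv_two_mid_bounds (le_of_lt h)
    omega

def bound (P : List Int) (x : Int) (upper : Bool) : Int :=
  boundAux P x upper 0 (PySem.List.len P)

def Main_alt (N : Int) (A : List Int) : Int :=
  let P := PySem.List.sorted ((PySem.List.pyRange 0 N 1).map (fun i => i + PySem.List.pyGetD A i 0))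
    (fun v => v) false
  (PySem.List.pyRange 0 N 1).foldl (fun ans j =>
    let q := j - PySem.List.pyGetD A j 0
    ans + (bound P q true - bound P q false)) 0

-- ===== PRECONDITION & SPEC =====
-- Pre_: A raises IndexError when N exceeds len(A); everything else returns normally.
def Pre_Main (N : Int) (A : List Int) : Prop := N ≤ (A.length : Int)
instance (N : Int) (A : List Int) : Decidable (Pre_Main N A) := by unfold Pre_Main; infer_instance
def pvWitness_Main : Int × List Int := (3, [1, 0, 2])

def Spec_Main (N : Int) (A : List Int) (out : Int) : Prop := out = Main_alt N A
instance (N : Int) (A : List Int) (out : Int) : Decidable (Spec_Main N A out) := by unfold Spec_Main; infer_instance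

-- ===== CLAIM (what is proved, stated in full; the proofs are below) =====
def Claim_equal_Main : Prop := ∀ (N : Int) (A : List Int), Dom_Main N A → Pre_Main N A → Spec_Main N A (Main N A)

-- ===== LEMMAS AND PROOFS =====

-- A's "if p not in d: d[p] = []" followed by "d[p].append(i)" is one modify with default [].
theorem setdefault_modify_step (d : PySem.Dict Int (List Int)) (p i : Int) :
    (if d.contains p then d else d.insert p ([] : List Int)).modify p [] (fun v => v ++ [i])
      = d.modify p [] (fun v => v ++ [i]) := by
  by_cases h : d.contains p = true
  · simp [h]
  · have h' : d.contains p = false := by simpa using h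
    simp only [h', if_neg Bool.false_ne_true]
    simp [PySem.Dict.modify, PySem.Dict.insert_insert_self,
      PySem.Dict.getD_of_not_contains _ _ h', PySem.Dict.getD_insert_self]

-- sum of an if-guarded accumulating loop
theorem foldl_ite_add {α : Type} (l : List α) (c : α → Prop) [DecidablePred c]
    (t : α → Int) (a : Int) :
    l.foldl (fun ans x => if c x then ans + t x else ans) a
      = a + (l.map (fun x => if c x then t x else 0)).sum := by
  induction l generalizing a with
  | nil => simp
  | cons x xs ih => by_cases h : c x <;> simp [h, ih, add_assoc]

theorem foldl_add_int {α : Type} (l : List α) (t : α → Int) (a : Int) :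
    l.foldl (fun ans x => ans + t x) a = a + (l.map t).sum := by
  induction l generalizing a with
  | nil => simp
  | cons x xs ih => simp [ih, add_assoc]

theorem sum_map_ite_mem (L : List Int) (c : Int → Int) (x : Int) (hnd : L.Nodup) :
    (L.map (fun k => if k = x then c k else 0)).sum = if x ∈ L then c x else 0 := by
  induction L with
  | nil => simp
  | cons y ys ih =>
    rcases List.nodup_cons.mp hnd with ⟨hy, hnd'⟩
    by_cases h : y = x
    · subst h
      simp [ih hnd', hy]
    · simp only [List.map_cons, List.sum_cons, if_neg h, zero_add, ih hnd', List.mem_cons]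
      have hx : ¬ (x = y) := fun e => h e.symm
      simp [hx]

-- the regrouping at the heart of the equivalence
theorem sum_count_mul (G : List Int) (L : List Int) (c : Int → Int)
    (hnd : L.Nodup) (h0 : ∀ x, x ∉ L → c x = 0) :
    (L.map (fun k => c k * (G.count k : Int))).sum = (G.map c).sum := by
  induction G with
  | nil => simp
  | cons x G' ih =>
    have step : (L.map (fun k => c k * ((x :: G').count k : Int))).sum
        = (L.map (fun k => c k * (G'.count k : Int) + (if k = x then c k else 0))).sum := by
      apply congrArg
      apply List.map_congr_left
      intro k _
      by_cases h : k = x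
      · subst h; simp; ring
      · have h' : ¬ x = k := fun e => h e.symm
        simp [h, h']
    rw [step, List.sum_map_add, ih, sum_map_ite_mem L c x hnd]
    by_cases hx : x ∈ L
    · simp [hx]; ring
    · simp [hx, h0 x hx]

-- A's first two loops build, per key, the list of indices mapping to it
theorem listdict_char (idx : List Int) (key : Int → Int) :
    idx.foldl (fun d i =>
      (if d.contains (key i) then d else d.insert (key i) ([] : List Int)).modify (key i) []
        (fun v => v ++ [i])) PySem.Dict.empty
    = (idx.map (fun i => (key i, i))).foldl
        (fun d p => d.modify p.1 [] (fun v => v ++ [p.2])) PySem.Dict.empty := by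
  rw [List.foldl_map]
  simp only [setdefault_modify_step]

theorem listdict_getD_len (idx : List Int) (key : Int → Int) (c : Int) :
    ((idx.foldl (fun d i =>
      (if d.contains (key i) then d else d.insert (key i) ([] : List Int)).modify (key i) []
        (fun v => v ++ [i])) PySem.Dict.empty).getD c []).length = (idx.map key).count c := by
  rw [listdict_char, PySem.Dict.getD_foldl_modify_append]
  simp [List.countP_map, List.count_eq_countP, Function.comp_def, ← List.countP_eq_length_filter]

theorem listdict_keys (idx : List Int) (key : Int → Int) :
    (idx.foldl (fun d i =>
      (if d.contains (key i) then d else d.insert (key i) ([] : List Int)).modify (key i) []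
        (fun v => v ++ [i])) PySem.Dict.empty).keys = PySem.Set.ofList (idx.map key) := by
  rw [listdict_char, PySem.Dict.keys_foldl_modify_key]
  simp [PySem.Set.update_nil_left, List.map_map, Function.comp_def]

theorem listdict_nodup (idx : List Int) (key : Int → Int) :
    (idx.foldl (fun d i =>
      (if d.contains (key i) then d else d.insert (key i) ([] : List Int)).modify (key i) []
        (fun v => v ++ [i])) PySem.Dict.empty).keys.Nodup := by
  rw [listdict_keys]
  exact PySem.Set.nodup_ofList _

-- A's value: sum over distinct keys k of count_F(k) * count_G(k)
theorem Main_eq (N : Int) (A : List Int) :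
    Main N A = ((PySem.Set.ofList ((PySem.List.pyRange 0 N 1).map
        (fun i => i + PySem.List.pyGetD A i 0))).map
      (fun k => ((((PySem.List.pyRange 0 N 1).map (fun i => i + PySem.List.pyGetD A i 0)).count k : Int))
        * (((PySem.List.pyRange 0 N 1).map (fun i => i - PySem.List.pyGetD A i 0)).count k : Int))).sum := by
  simp only [Main]
  rw [foldl_ite_add, PySem.Dict.items_eq_map_keys _ (listdict_nodup _ _) ([] : List Int),
      listdict_keys, List.map_map, zero_add]
  apply congrArg List.sum
  apply List.map_congr_left
  intro k hk
  have hcont : ((PySem.List.pyRange 0 N 1).foldl (fun d i =>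
      (if d.contains (i - PySem.List.pyGetD A i 0) then d
       else d.insert (i - PySem.List.pyGetD A i 0) ([] : List Int)).modify
        (i - PySem.List.pyGetD A i 0) [] (fun v => v ++ [i])) PySem.Dict.empty).contains k = true
      ↔ k ∈ (PySem.List.pyRange 0 N 1).map (fun i => i - PySem.List.pyGetD A i 0) := by
    rw [PySem.Dict.contains_iff_mem_keys, listdict_keys, PySem.Set.mem_ofList]
  have hkF : k ∈ (PySem.List.pyRange 0 N 1).map (fun i => i + PySem.List.pyGetD A i 0) := by
    rw [PySem.Set.mem_ofList] at hk
    exact hk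
  simp only [Function.comp_def, PySem.List.len_eq, listdict_getD_len]
  by_cases hG : k ∈ (PySem.List.pyRange 0 N 1).map (fun i => i - PySem.List.pyGetD A i 0)
  · rw [if_pos ⟨by exact_mod_cast List.count_pos_iff.mpr hkF, hcont.mpr hG⟩]
  · rw [if_neg (fun hand => absurd (hcont.mp hand.2) hG)]
    simp [List.count_eq_zero.mpr hG]

-- the predicate boundAux's probe decides, as a Bool
def bpred (x : Int) (upper : Bool) (v : Int) : Bool :=
  if upper then decide (v ≤ x) else decide (v < x)

theorem bpred_mono (x : Int) (upper : Bool) (v w : Int) (hvw : v ≤ w)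
    (hw : bpred x upper w = true) : bpred x upper v = true := by
  cases upper <;> simp [bpred] at * <;> omega

-- a split position names the countP
theorem countP_eq_of_split (P : List Int) (p : Int → Bool) (r : Int) (h0 : 0 ≤ r)
    (hr : r ≤ (P.length : Int))
    (hpre : ∀ (k : Nat), (k : Int) < r → ∀ (hk : k < P.length), p P[k] = true)
    (hpost : ∀ (k : Nat), r ≤ (k : Int) → ∀ (hk : k < P.length), ¬ p P[k] = true) :
    (P.countP p : Int) = r := by
  have hsplit : P = P.take r.toNat ++ P.drop r.toNat := (List.take_append_drop _ _).symm
  have htake : (P.take r.toNat).countP p = (P.take r.toNat).length := by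
    rw [List.countP_eq_length]
    intro a ha
    rcases List.mem_iff_getElem.mp ha with ⟨i, hi, rfl⟩
    rw [List.getElem_take]
    exact hpre i (by simp at hi; omega) _
  have hdrop : (P.drop r.toNat).countP p = 0 := by
    rw [List.countP_eq_zero]
    intro a ha
    rcases List.mem_iff_getElem.mp ha with ⟨i, hi, rfl⟩
    rw [List.getElem_drop]
    exact hpost (r.toNat + i) (by omega) _
  rw [hsplit, List.countP_append, htake, hdrop, List.length_take]
  omega

theorem boundAux_spec (P : List Int) (x : Int) (upper : Bool)
    (hsort : P.Pairwise (· ≤ ·)) (lo hi : Int)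
    (h0 : 0 ≤ lo) (hlh : lo ≤ hi) (hh : hi ≤ (P.length : Int))
    (hpre : ∀ (k : Nat), (k : Int) < lo → ∀ (hk : k < P.length), bpred x upper P[k] = true)
    (hpost : ∀ (k : Nat), hi ≤ (k : Int) → ∀ (hk : k < P.length), ¬ bpred x upper P[k] = true) :
    boundAux P x upper lo hi = (P.countP (bpred x upper) : Int) := by
  have hmono := List.pairwise_iff_getElem.mp hsort
  induction lo, hi using boundAux.induct P x upper with
  | case1 lo hi h mid hc ih =>
    rw [boundAux, dif_pos h]
    simp only [dite_eq_ite] at hc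
    have hb := PySem.Int.floordiv_two_mid_bounds (le_of_lt h)
    have hmlt : mid < hi := (PySem.Int.floordiv_lt_iff_lt_mul (by norm_num)).mpr (by omega)
    rw [if_pos hc]
    apply ih (by omega) (by omega) hh
    · intro k hk hklen
      have hmidlen : mid < (P.length : Int) := by omega
      have hmid : PySem.List.pyGetD P mid 0 = P[mid.toNat] :=
        PySem.List.pyGetD_eq_getElem P 0 (by omega) hmidlen
      have hpm : bpred x upper P[mid.toNat] = true := by
        rw [← hmid]; cases upper <;> simpa [bpred] using hc
      rcases Nat.lt_or_ge k mid.toNat with hlt | hge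
      · exact bpred_mono x upper _ _ (hmono k mid.toNat hklen (by omega) hlt) hpm
      · have hkm : k = mid.toNat := by omega
        subst hkm; exact hpm
    · exact hpost
  | case2 lo hi h mid hc ih =>
    rw [boundAux, dif_pos h]
    simp only [dite_eq_ite] at hc
    have hb := PySem.Int.floordiv_two_mid_bounds (le_of_lt h)
    have hmlt : mid < hi := (PySem.Int.floordiv_lt_iff_lt_mul (by norm_num)).mpr (by omega)
    rw [if_neg hc]
    apply ih h0 (by omega) (by omega) hpre
    intro k hk hklen
    have hmidlen : mid < (P.length : Int) := by omega
    have hmid : PySem.List.pyGetD P mid 0 = P[mid.toNat] :=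
      PySem.List.pyGetD_eq_getElem P 0 (by omega) hmidlen
    have hpm : ¬ bpred x upper P[mid.toNat] = true := by
      rw [← hmid]; cases upper <;> simpa [bpred] using hc
    rcases Nat.lt_or_ge mid.toNat k with hlt | hge
    · intro hk'
      exact hpm (bpred_mono x upper _ _ (hmono mid.toNat k (by omega) hklen hlt) hk')
    · have hkm : k = mid.toNat := by omega
      subst hkm; exact hpm
  | case3 lo hi h =>
    rw [boundAux, dif_neg h]
    have hEq : lo = hi := by omega
    subst hEq
    exact (countP_eq_of_split P _ lo h0 (by omega)
      (fun k hk hklen => hpre k hk hklen)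
      (fun k hk hklen => hpost k hk hklen)).symm

theorem bound_eq_countP (P : List Int) (x : Int) (upper : Bool)
    (hsort : P.Pairwise (· ≤ ·)) :
    bound P x upper = (P.countP (bpred x upper) : Int) := by
  unfold bound
  rw [PySem.List.len_eq]
  exact boundAux_spec P x upper hsort 0 (P.length : Int) le_rfl (by omega) le_rfl
    (fun k hk _ => absurd hk (by omega)) (fun k hk hklen => absurd hk (by omega))

-- counting ≤ minus counting < is counting =
theorem countP_le_sub_lt (P : List Int) (q : Int) :
    (P.countP (fun v => decide (v ≤ q)) : Int) - (P.countP (fun v => decide (v < q)) : Int)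
      = (P.count q : Int) := by
  induction P with
  | nil => simp
  | cons y ys ih =>
    simp only [List.countP_cons, List.count_cons]
    by_cases h : y = q
    · subst h; simp; omega
    · have h1 : decide (y ≤ q) = decide (y < q) := by
        by_cases hlt : y < q <;> simp [hlt] <;> omega
      simp [h1, h]
      push_cast at *
      omega

-- B's value: sum over j of count_F(g j)
theorem Main_alt_eq (N : Int) (A : List Int) :
    Main_alt N A = (((PySem.List.pyRange 0 N 1).map (fun i => i - PySem.List.pyGetD A i 0)).map
      (fun x => (((PySem.List.pyRange 0 N 1).map (fun i => i + PySem.List.pyGetD A i 0)).count x : Int))).sum := by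
  simp only [Main_alt]
  have hsort : (PySem.List.sorted ((PySem.List.pyRange 0 N 1).map
      (fun i => i + PySem.List.pyGetD A i 0)) (fun v => v) false).Pairwise (· ≤ ·) :=
    PySem.List.sorted_pairwise _ _
  rw [foldl_add_int, zero_add, List.map_map]
  apply congrArg List.sum
  apply List.map_congr_left
  intro j _
  simp only [Function.comp_def]
  rw [bound_eq_countP _ _ _ hsort, bound_eq_countP _ _ _ hsort]
  have hperm := PySem.List.sorted_perm ((PySem.List.pyRange 0 N 1).map
      (fun i => i + PySem.List.pyGetD A i 0)) (fun v => v) false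
  rw [← hperm.count_eq]
  simpa [bpred] using countP_le_sub_lt _ (j - PySem.List.pyGetD A j 0)

-- ===== VERDICT (by name: the statement is the Claim_ definition above) =====
theorem Main_spec : Claim_equal_Main := by
  intro N A _ _
  unfold Spec_Main
  rw [Main_eq, Main_alt_eq]
  exact sum_count_mul _ _ _ (PySem.Set.nodup_ofList _)
    (fun x hx => by
      simp only [PySem.Set.mem_ofList] at hx
      simp [List.count_eq_zero.mpr hx])
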